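-- pv_equiv track=rewrite | github.com/vsedov/advent-of-code | src/aoc/aoc2022/day_07.py | dir_sizes
-- ===== SOURCE A (Python) =====
-- def dir_sizes(sizes: dict) -> dict:
--     dirs = {}
--     for path, size in sizes.items():
--         path = list(path)
--         while path:
--             dirs[tuple(path)] = dirs.get(tuple(path), 0) + size
--             path.pop()
--     return dirs
-- ===== SOURCE B (Python) =====
-- def dir_sizes(sizes: dict) -> dict:
--     # Phase 1: key order = first occurrence of each non-empty prefix,
--     # enumerated longest-first per entry (matching dict insertion order).
--     order = []
--     seen = set()
--     for path in sizes:
--         for k in range(len(path), 0, -1):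
--             p = tuple(path[:k])
--             if p not in seen:
--                 seen.add(p)
--                 order.append(p)
--     # Phase 2: each directory's total is the sum of sizes of entries it prefixes.
--     return {p: sum(s for q, s in sizes.items() if q[:len(p)] == p) for p in order}
-- ===== Notes on version B (the rewrite author's own statement) =====
-- stated objective: alternative
-- what changed: Replaces A's single accumulate-into-dict pass with two decoupled phases: a seen-set pass that fixes the key order of first-seen non-empty prefixes, then a dict comprehension that characterises each directory's total directly as the sum of sizes of all entries it prefixes, with no mutable accumulation dict.
import Mathlib
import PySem

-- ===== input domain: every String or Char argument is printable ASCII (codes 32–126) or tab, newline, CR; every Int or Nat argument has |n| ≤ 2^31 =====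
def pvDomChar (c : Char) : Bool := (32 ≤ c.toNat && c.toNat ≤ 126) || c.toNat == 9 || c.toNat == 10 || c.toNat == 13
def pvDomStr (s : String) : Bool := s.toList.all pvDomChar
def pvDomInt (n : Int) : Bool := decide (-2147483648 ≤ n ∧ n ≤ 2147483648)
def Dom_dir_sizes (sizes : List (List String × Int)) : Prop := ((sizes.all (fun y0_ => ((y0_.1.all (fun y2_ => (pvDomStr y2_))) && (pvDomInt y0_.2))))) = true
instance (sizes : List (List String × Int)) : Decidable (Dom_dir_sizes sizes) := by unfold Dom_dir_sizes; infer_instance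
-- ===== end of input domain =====

-- B replaces A's accumulate-into-dict pass by two decoupled phases (a key-order pass, then a per-key
-- prefix-sum characterisation of each directory's total); an alternative decomposition, same results.


-- ===== PORT A =====
-- 'while path: dirs[tuple(path)] = dirs.get(tuple(path), 0) + size; path.pop()'
def pvALoop (dirs : PySem.Dict (List String) Int) (path : List String) (size : Int) :
    PySem.Dict (List String) Int :=
  if _h : path = [] then dirs
  else pvALoop (dirs.insert path (dirs.getD path 0 + size)) path.dropLast size
termination_by path.length
decreasing_by have : 0 < path.length := List.length_pos_iff.mpr _h
              simp [List.length_dropLast]; omega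

def dir_sizes (sizes : List (List String × Int)) : List (List String × Int) :=
  (sizes.foldl (fun dirs e => pvALoop dirs e.1 e.2) PySem.Dict.empty).items

-- ===== PORT B =====
-- phase 1: 'for path in sizes: for k in range(len(path), 0, -1): p = path[:k]; if p not in seen: …'
-- (the Python's local 'p = path[:k]' is inlined at its three uses), then
-- phase 2: '{p: sum(s for q, s in sizes.items() if q[:len(p)] == p) for p in order}'
def dir_sizes_alt (sizes : List (List String × Int)) : List (List String × Int) :=
  let os : List (List String) × PySem.Set (List String) :=
    sizes.foldl (fun st e =>
      (PySem.List.pyRange (e.1.length : Int) 0 (-1)).foldl (fun st k =>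
        if PySem.Set.contains st.2 (PySem.List.slice e.1 none (some k)) then st
        else (st.1 ++ [PySem.List.slice e.1 none (some k)],
              PySem.Set.add st.2 (PySem.List.slice e.1 none (some k)))) st)
      ([], PySem.Set.empty)
  os.1.map (fun p =>
    (p, ((sizes.filter (fun qs =>
            PySem.List.slice qs.1 none (some (p.length : Int)) == p)).map (·.2)).sum))

-- ===== PRECONDITION & SPEC =====
def Spec_dir_sizes (sizes : List (List String × Int)) (out : List (List String × Int)) : Prop := out = dir_sizes_alt sizes
instance (sizes : List (List String × Int)) (out : List (List String × Int)) : Decidable (Spec_dir_sizes sizes out) := by unfold Spec_dir_sizes; infer_instance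

-- ===== CLAIM (what is proved, stated in full; the proofs are below) =====
def Claim_equal_dir_sizes : Prop := ∀ (sizes : List (List String × Int)), Dom_dir_sizes sizes → Spec_dir_sizes sizes (dir_sizes sizes)

-- ===== LEMMAS AND PROOFS =====

-- the chain of prefixes of `path`, longest first (what A's while-loop visits)
def prefChain : List String → List (List String)
  | [] => []
  | a :: rest => (a :: rest) :: prefChain (a :: rest).dropLast
termination_by p => p.length
decreasing_by simp [List.length_dropLast]

theorem take_dropLast' (l : List String) (n : Nat) (h : n + 1 ≤ l.length) :
    l.dropLast.take n = l.take n := by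
  rw [List.dropLast_eq_take, List.take_take, Nat.min_eq_left (by omega)]

theorem prefChain_mem {q x : List String} (h : x ∈ prefChain q) :
    0 < x.length ∧ q.take x.length = x := by
  induction q using prefChain.induct with
  | case1 => simp [prefChain] at h
  | case2 a rest ih =>
    rw [prefChain] at h
    rcases List.mem_cons.mp h with rfl | h2
    · exact ⟨by simp, List.take_length⟩
    · obtain ⟨h1, h2'⟩ := ih h2
      have hlen := congrArg List.length h2'
      simp only [List.length_take, List.length_dropLast, List.length_cons] at hlen
      refine ⟨h1, ?_⟩
      rw [← take_dropLast' (a :: rest) x.length (by simp only [List.length_cons]; omega)]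
      exact h2'

theorem mem_prefChain {q x : List String} (h1 : 0 < x.length) (h2 : q.take x.length = x) :
    x ∈ prefChain q := by
  induction q using prefChain.induct with
  | case1 =>
    exfalso
    have := congrArg List.length h2
    simp at this; omega
  | case2 a rest ih =>
    rw [prefChain]
    by_cases hq : x.length = (a :: rest).length
    · have hx : x = a :: rest := by rw [← h2, hq, List.take_length]
      exact hx ▸ List.mem_cons_self
    · right
      simp only [List.length_cons] at hq
      have hl := congrArg List.length h2
      simp only [List.length_take, List.length_cons] at hl
      exact ih (by rw [take_dropLast' (a :: rest) x.length (by simp only [List.length_cons]; omega)]; exact h2)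

theorem prefChain_length_le {q x : List String} (h : x ∈ prefChain q) : x.length ≤ q.length := by
  obtain ⟨h1, h2⟩ := prefChain_mem h
  have := congrArg List.length h2
  simp [List.length_take] at this
  omega

theorem prefChain_nodup (q : List String) : (prefChain q).Nodup := by
  induction q using prefChain.induct with
  | case1 => simp [prefChain]
  | case2 a rest ih =>
    rw [prefChain]
    refine List.nodup_cons.mpr ⟨fun hmem => ?_, ih⟩
    have := prefChain_length_le hmem
    simp [List.length_dropLast] at this

-- A's while-loop is a fold of insert-accumulate over the prefix chain
theorem pvALoop_eq (dirs : PySem.Dict (List String) Int) (path : List String) (size : Int) :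
    pvALoop dirs path size =
      (prefChain path).foldl (fun d p => d.insert p (d.getD p 0 + size)) dirs := by
  induction path using prefChain.induct generalizing dirs with
  | case1 => rw [pvALoop, prefChain]; simp
  | case2 a rest ih =>
    rw [pvALoop, prefChain, dif_neg (List.cons_ne_nil a rest)]
    simp only [List.foldl_cons]
    exact ih _

-- value accumulated by an insert-accumulate fold
theorem getD_accum (l : List (List String × Int)) (d : PySem.Dict (List String) Int)
    (k : List String) :
    (l.foldl (fun d p => d.insert p.1 (d.getD p.1 0 + p.2)) d).getD k 0 =
      d.getD k 0 + ((l.filter (fun p => p.1 == k)).map (·.2)).sum := by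
  induction l generalizing d with
  | nil => simp
  | cons p l ih =>
    simp only [List.foldl_cons, ih, List.filter_cons]
    by_cases hpk : p.1 = k
    · simp [hpk]
      ring
    · have hkp : ¬ k = p.1 := fun h => hpk h.symm
      simp [hpk, hkp, PySem.Dict.getD_insert]

theorem pyRange_take_eq_prefChain (path : List String) :
    (PySem.List.pyRange (path.length : Int) 0 (-1)).map
        (fun k => path.take k.toNat) = prefChain path := by
  induction path using prefChain.induct with
  | case1 => simp [prefChain, PySem.List.pyRange_neg_one_eq_nil]
  | case2 a rest ih =>
    rw [prefChain, PySem.List.pyRange_neg_one_cons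
      (by exact_mod_cast List.length_pos_iff.mpr (List.cons_ne_nil a rest))]
    simp only [List.map_cons]
    congr 1
    · simp
    · rw [← ih]
      have hlen : ((a :: rest).length : Int) - 1 = ((a :: rest).dropLast.length : Int) := by
        simp [List.length_dropLast]
      rw [hlen]
      apply List.map_congr_left
      intro k hk
      rw [PySem.List.mem_pyRange_neg_one] at hk
      have h0 : (0:Int) < k := hk.1
      have hk2 : k ≤ ((a :: rest).dropLast.length : Int) := hk.2
      rw [take_dropLast' (a :: rest) k.toNat]
      simp only [List.length_dropLast, List.length_cons] at hk2
      simp only [List.length_cons]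
      omega

-- B's prefix enumeration equals the prefix chain
theorem pyRange_slice_eq_prefChain (path : List String) :
    (PySem.List.pyRange (path.length : Int) 0 (-1)).map
        (fun k => PySem.List.slice path none (some k)) = prefChain path := by
  rw [← pyRange_take_eq_prefChain]
  apply List.map_congr_left
  intro k hk
  rw [PySem.List.mem_pyRange_neg_one] at hk
  exact PySem.List.slice_to path hk.1.le

-- B's order/seen loop keeps its two components equal and acts as Set.add on both
theorem pairFold (ps : List (List String)) (s : PySem.Set (List String)) :
    ps.foldl (fun st p => if PySem.Set.contains st.2 p then st
                          else (st.1 ++ [p], PySem.Set.add st.2 p)) (s, s)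
      = (PySem.Set.update s ps, PySem.Set.update s ps) := by
  induction ps generalizing s with
  | nil => simp [PySem.Set.update]
  | cons p ps ih =>
    simp only [List.foldl_cons, PySem.Set.update_cons]
    by_cases hc : PySem.Set.contains s p = true
    · have hm : p ∈ s := (PySem.Set.contains_iff s p).mp hc
      rw [if_pos hc, PySem.Set.add_of_mem hm]
      exact ih s
    · have hm : p ∉ s := fun h => hc ((PySem.Set.contains_iff s p).mpr h)
      rw [if_neg hc, PySem.Set.add_of_not_mem hm]
      exact ih _

-- one entry's contribution to the accumulated value at key p
theorem perEntry (q : List String) (s : Int) (p : List String) (hp : 0 < p.length) :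
    ((((prefChain q).map (fun r => (r, s))).filter (fun pr => pr.1 == p)).map (·.2)).sum
      = if q.take p.length = p then s else 0 := by
  rw [List.filter_map]
  rw [List.map_map]
  have hcomp : ((fun pr : List String × Int => pr.1 == p) ∘ fun r => (r, s)) = (· == p) := rfl
  rw [hcomp, List.filter_beq]
  have hmapc : ((·.2) ∘ fun r : List String => (r, s)) = fun _ => s := rfl
  rw [hmapc, List.map_replicate, List.sum_replicate]
  by_cases hmem : p ∈ prefChain q
  · rw [List.count_eq_one_of_mem (prefChain_nodup q) hmem]
    rw [if_pos (prefChain_mem hmem).2]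
    simp
  · rw [List.count_eq_zero.mpr hmem]
    rw [if_neg (fun h => hmem (mem_prefChain hp h))]
    simp

-- A's nested loops are one insert-accumulate fold over the flattened (prefix, size) stream
theorem aFold (l : List (List String × Int)) (d : PySem.Dict (List String) Int) :
    l.foldl (fun d e => (prefChain e.1).foldl (fun d p => d.insert p (d.getD p 0 + e.2)) d) d
      = (l.flatMap (fun e => (prefChain e.1).map (fun p => (p, e.2)))).foldl
          (fun d pr => d.insert pr.1 (d.getD pr.1 0 + pr.2)) d := by
  induction l generalizing d with
  | nil => simp
  | cons e l ih =>
    simp only [List.foldl_cons, List.flatMap_cons, List.foldl_append, List.foldl_map]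
    rw [ih]

-- B's order loop computes the deduplicated flattened prefix stream
theorem bFold (l : List (List String × Int)) (s : PySem.Set (List String)) :
    l.foldl (fun st e =>
      (PySem.List.pyRange (e.1.length : Int) 0 (-1)).foldl (fun st k =>
        if PySem.Set.contains st.2 (PySem.List.slice e.1 none (some k)) then st
        else (st.1 ++ [PySem.List.slice e.1 none (some k)],
              PySem.Set.add st.2 (PySem.List.slice e.1 none (some k)))) st) (s, s)
      = (PySem.Set.update s (l.flatMap (fun e => prefChain e.1)),
         PySem.Set.update s (l.flatMap (fun e => prefChain e.1))) := by
  induction l generalizing s with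
  | nil => simp [PySem.Set.update]
  | cons e l ih =>
    simp only [List.foldl_cons, List.flatMap_cons]
    rw [show (PySem.List.pyRange ((e.1.length : Int)) 0 (-1)).foldl (fun st k =>
        if PySem.Set.contains st.2 (PySem.List.slice e.1 none (some k)) then st
        else (st.1 ++ [PySem.List.slice e.1 none (some k)],
              PySem.Set.add st.2 (PySem.List.slice e.1 none (some k)))) (s, s)
      = ((PySem.List.pyRange ((e.1.length : Int)) 0 (-1)).map
            (fun k => PySem.List.slice e.1 none (some k))).foldl
          (fun st p => if PySem.Set.contains st.2 p then st
                       else (st.1 ++ [p], PySem.Set.add st.2 p)) (s, s)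
      from (List.foldl_map (f := fun k : Int => PySem.List.slice e.1 none (some k))
        (g := fun st : List (List String) × PySem.Set (List String) => fun p =>
          if PySem.Set.contains st.2 p then st
          else (st.1 ++ [p], PySem.Set.add st.2 p))).symm]
    rw [pyRange_slice_eq_prefChain, pairFold, ih, PySem.Set.update_append]

-- A's accumulated value at a non-empty key p is B's prefix sum at p
theorem valueEq (sizes : List (List String × Int)) (p : List String) (hp : 0 < p.length) :
    (((sizes.flatMap (fun e => (prefChain e.1).map (fun q => (q, e.2)))).filter
        (fun pr => pr.1 == p)).map (·.2)).sum
      = (((sizes.filter (fun qs =>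
            PySem.List.slice qs.1 none (some (p.length : Int)) == p)).map (·.2)).sum) := by
  induction sizes with
  | nil => simp
  | cons e l ih =>
    simp only [List.flatMap_cons, List.filter_append, List.map_append, List.sum_append,
      List.filter_cons]
    rw [perEntry e.1 e.2 p hp, ih]
    rw [PySem.List.slice_to e.1 (by positivity : (0:Int) ≤ (p.length : Int))]
    simp only [Int.toNat_natCast]
    by_cases hc : e.1.take p.length = p
    · simp [hc]
    · simp [hc]

theorem main_eq (sizes : List (List String × Int)) : dir_sizes sizes = dir_sizes_alt sizes := by
  unfold dir_sizes dir_sizes_alt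
  simp only [pvALoop_eq]
  rw [aFold]
  rw [show (([], PySem.Set.empty) : List (List String) × PySem.Set (List String))
        = (PySem.Set.empty, PySem.Set.empty) from rfl]
  rw [bFold sizes PySem.Set.empty]
  have h1 : PySem.Set.update (PySem.Set.empty)
        (sizes.flatMap (fun e => prefChain e.1))
      = PySem.Set.ofList (sizes.flatMap (fun e => prefChain e.1)) :=
    PySem.Set.update_nil_left _
  rw [h1]
  set stream := sizes.flatMap (fun e => (prefChain e.1).map (fun p => (p, e.2))) with hstream
  have hnd : (stream.foldl (fun d pr => d.insert pr.1 (d.getD pr.1 0 + pr.2))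
      (PySem.Dict.empty : PySem.Dict (List String) Int)).keys.Nodup :=
    PySem.Dict.nodup_keys_foldl_insert_key stream Prod.fst
      (fun d x => d.getD x.1 0 + x.2) PySem.Dict.empty PySem.Dict.nodup_keys_empty
  rw [PySem.Dict.items_eq_map_keys _ hnd 0]
  rw [PySem.Dict.keys_foldl_insert_key stream Prod.fst
      (fun d x => d.getD x.1 0 + x.2) PySem.Dict.empty]
  rw [PySem.Dict.keys_empty, PySem.Set.update_nil_left]
  have hmap : stream.map Prod.fst = sizes.flatMap (fun e => prefChain e.1) := by
    simp [hstream, List.map_flatMap, List.map_map, Function.comp_def]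
  rw [hmap]
  apply List.map_congr_left
  intro p hp
  have hpS : p ∈ sizes.flatMap (fun e => prefChain e.1) := (PySem.Set.mem_ofList _ _).mp hp
  obtain ⟨e, _he, hpe⟩ := List.mem_flatMap.mp hpS
  have hp0 : 0 < p.length := (prefChain_mem hpe).1
  rw [getD_accum stream PySem.Dict.empty p, PySem.Dict.getD_empty, zero_add,
    valueEq sizes p hp0]

-- ===== VERDICT (by name: the statement is the Claim_ definition above) =====
theorem dir_sizes_spec : Claim_equal_dir_sizes :=
  fun sizes _ => main_eq sizes
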